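-- pv_equiv track=rewrite | github.com/ViditSachdev1412/Advent-of-Code-2024 | Solutions/Solution_Day25.py | convert_to_heights
-- ===== SOURCE A (Python) =====
-- def convert_to_heights(schematic, is_lock=True):
--     columns = zip(*schematic)
--     heights = []
--     for column in columns:
--         if is_lock:
--             heights.append(sum(1 for cell in column if cell == '#'))
--         else:
--             heights.append(sum(1 for cell in reversed(column) if cell == '#'))
--     return heights
-- ===== SOURCE B (Python) =====
-- def convert_to_heights(schematic, is_lock=True):
--     # Row-major accumulation: counting '#' per column is order-independent,
--     # so is_lock (top-down vs bottom-up) does not change the result.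
--     if not schematic:
--         return []
--     n = min(len(row) for row in schematic)  # zip(*schematic) truncates to shortest row
--     heights = [0] * n
--     for row in schematic:
--         heights = [h + (1 if c == '#' else 0) for h, c in zip(heights, row)]
--     return heights
-- ===== Notes on version B (the rewrite author's own statement) =====
-- stated objective: alternative
-- what changed: Replaces the zip(*schematic) transpose with a single row-major pass that element-wise accumulates a running counts list, using the observation that the per-column '#' count is order-independent so the is_lock reversal branch disappears.
import Mathlib
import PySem

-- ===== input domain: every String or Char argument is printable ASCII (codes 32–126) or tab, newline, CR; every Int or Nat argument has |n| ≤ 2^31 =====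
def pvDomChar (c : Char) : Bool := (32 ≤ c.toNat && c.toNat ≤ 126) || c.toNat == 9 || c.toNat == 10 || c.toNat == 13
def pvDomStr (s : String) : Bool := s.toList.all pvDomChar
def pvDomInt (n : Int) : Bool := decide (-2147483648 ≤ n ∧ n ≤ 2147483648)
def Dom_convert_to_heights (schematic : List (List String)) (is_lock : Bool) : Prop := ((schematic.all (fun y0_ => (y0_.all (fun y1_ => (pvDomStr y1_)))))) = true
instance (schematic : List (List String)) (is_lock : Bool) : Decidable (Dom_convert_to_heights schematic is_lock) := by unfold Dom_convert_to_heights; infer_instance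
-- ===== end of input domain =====

-- B replaces the zip(*schematic) transpose + per-column sum with a single row-major pass
-- maintaining a running counts list (objective: alternative decomposition, same cost).

-- ===== PORT A =====
-- zip(*schematic): for each j below the minimum row length, the list of j-th cells of all rows
def pvZipStar (schematic : List (List String)) : List (List String) :=
  match schematic with
  | [] => []
  | r :: rs =>
    (List.range (rs.foldl (fun m row => min m row.length) r.length)).map
      (fun j => schematic.map (fun row => row.getD j ""))

def convert_to_heights (schematic : List (List String)) (is_lock : Bool) : List Int :=
  let columns := pvZipStar schematic
  columns.foldl
    (fun heights column =>
      if is_lock then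
        heights ++ [((column.filter (fun cell => cell == "#")).length : Int)]
      else
        heights ++ [((column.reverse.filter (fun cell => cell == "#")).length : Int)])
    []

-- ===== PORT B =====
def convert_to_heights_alt (schematic : List (List String)) (is_lock : Bool) : List Int :=
  match schematic with
  | [] => []
  | r :: rs =>
    let n := rs.foldl (fun m row => min m row.length) r.length
    (r :: rs).foldl
      (fun heights row =>
        List.zipWith (fun h c => h + (if c == "#" then (1 : Int) else 0)) heights row)
      (List.replicate n (0 : Int))

-- ===== PRECONDITION & SPEC =====
def Spec_convert_to_heights (schematic : List (List String)) (is_lock : Bool) (out : List Int) : Prop := out = convert_to_heights_alt schematic is_lock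
instance (schematic : List (List String)) (is_lock : Bool) (out : List Int) : Decidable (Spec_convert_to_heights schematic is_lock out) := by unfold Spec_convert_to_heights; infer_instance

-- ===== CLAIM (what is proved, stated in full; the proofs are below) =====
def Claim_equal_convert_to_heights : Prop := ∀ (schematic : List (List String)) (is_lock : Bool), Dom_convert_to_heights schematic is_lock → Spec_convert_to_heights schematic is_lock (convert_to_heights schematic is_lock)

-- ===== LEMMAS AND PROOFS =====

-- per-column '#' count over a list of rows
def pvCnt (rows : List (List String)) (j : Nat) : Int :=
  (((rows.map (fun row => row.getD j "")).filter (fun c => c == "#")).length : Int)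

lemma pvCnt_nil (j : Nat) : pvCnt [] j = 0 := rfl

lemma pvCnt_cons (r : List String) (rows : List (List String)) (j : Nat) :
    pvCnt (r :: rows) j = (if r.getD j "" == "#" then (1 : Int) else 0) + pvCnt rows j := by
  simp only [pvCnt, List.map_cons, List.filter_cons]
  split <;> simp <;> ring

lemma foldl_append_map {α : Type} (l : List α) (f : α → Int) :
    ∀ acc : List Int, l.foldl (fun a c => a ++ [f c]) acc = acc ++ l.map f := by
  induction l with
  | nil => simp
  | cons x xs ih => intro acc; simp [List.foldl_cons, ih]

-- the min fold bounds every row length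
lemma minfold_le (rs : List (List String)) :
    ∀ (a : Nat), (rs.foldl (fun m row => min m row.length) a ≤ a) ∧
      ∀ r ∈ rs, rs.foldl (fun m row => min m row.length) a ≤ r.length := by
  induction rs with
  | nil => simp
  | cons x xs ih =>
    intro a
    refine ⟨le_trans (ih (min a x.length)).1 (min_le_left _ _), ?_⟩
    intro r hr
    rcases List.mem_cons.mp hr with h | h
    · subst h; exact le_trans (ih (min a r.length)).1 (min_le_right _ _)
    · exact (ih (min a x.length)).2 r h

-- B's fold, characterised
lemma alt_fold_char (n : Nat) :
    ∀ (rows : List (List String)) (h : List Int), h.length = n →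
      (∀ r ∈ rows, n ≤ r.length) →
      rows.foldl
        (fun heights row =>
          List.zipWith (fun h c => h + (if c == "#" then (1 : Int) else 0)) heights row) h
      = (List.range n).map (fun j => h.getD j 0 + pvCnt rows j) := by
  intro rows
  induction rows with
  | nil =>
    intro h hlen _
    simp only [List.foldl_nil, pvCnt_nil, add_zero]
    apply List.ext_getElem
    · simp [hlen]
    · intro i h1 h2
      have hi : i < h.length := h1
      simp [List.getD, List.getElem?_eq_getElem hi]
  | cons r rest ih =>
    intro h hlen hb
    have hr : n ≤ r.length := hb r (by simp)
    have hz : (List.zipWith (fun h c => h + (if c == "#" then (1 : Int) else 0)) h r).length = n := by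
      simp [hlen]; omega
    rw [List.foldl_cons, ih _ hz (fun r hr => hb r (by simp [hr]))]
    apply List.map_congr_left
    intro j hj
    have hjn : j < n := List.mem_range.mp hj
    have h1 : (List.zipWith (fun h c => h + (if c == "#" then (1 : Int) else 0)) h r).getD j 0
        = h.getD j 0 + (if r.getD j "" == "#" then (1 : Int) else 0) := by
      have hjh : j < h.length := by omega
      have hjr : j < r.length := by omega
      have hjz : j < (List.zipWith (fun h c => h + (if c == "#" then (1 : Int) else 0)) h r).length := by omega
      simp [List.getD, List.getElem?_eq_getElem, hjh, hjr, hjz,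
        List.getElem?_eq_getElem hjz]
    rw [h1, pvCnt_cons]; ring

-- ===== VERDICT (by name: the statement is the Claim_ definition above) =====
theorem convert_to_heights_spec : Claim_equal_convert_to_heights := by
  intro schematic is_lock _
  unfold Spec_convert_to_heights convert_to_heights convert_to_heights_alt pvZipStar
  cases schematic with
  | nil => cases is_lock <;> rfl
  | cons r rs =>
    show (((List.range (rs.foldl (fun m row => min m row.length) r.length)).map
            (fun j => (r :: rs).map (fun row => row.getD j ""))).foldl
          (fun heights column =>
            if is_lock = true then
              heights ++ [((column.filter (fun cell => cell == "#")).length : Int)]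
            else
              heights ++ [((column.reverse.filter (fun cell => cell == "#")).length : Int)]) [])
        = (r :: rs).foldl
            (fun heights row =>
              List.zipWith (fun h c => h + (if c == "#" then (1 : Int) else 0)) heights row)
            (List.replicate (rs.foldl (fun m row => min m row.length) r.length) (0 : Int))
    have hbound : ∀ row ∈ r :: rs, (rs.foldl (fun m row => min m row.length) r.length) ≤ row.length := by
      intro row hrow
      rcases List.mem_cons.mp hrow with h | h
      · subst h; exact (minfold_le rs row.length).1
      · exact (minfold_le rs r.length).2 row h
    generalize hgen : rs.foldl (fun m row => min m row.length) r.length = n at hbound ⊢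
    have hA : ((List.range n).map (fun j => (r :: rs).map (fun row => row.getD j ""))).foldl
          (fun heights column =>
            if is_lock = true then
              heights ++ [((column.filter (fun cell => cell == "#")).length : Int)]
            else
              heights ++ [((column.reverse.filter (fun cell => cell == "#")).length : Int)]) []
        = (List.range n).map (fun j => pvCnt (r :: rs) j) := by
      cases is_lock with
      | true =>
        simp only [if_true]
        rw [foldl_append_map]
        simp [pvCnt, Function.comp]
      | false =>
        simp only [Bool.false_eq_true, if_false]
        rw [foldl_append_map]
        simp only [List.nil_append, List.map_map]
        apply List.map_congr_left
        intro j _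
        simp [pvCnt, List.filter_reverse, Function.comp, List.filter_cons]
        split <;> simp <;> push_cast <;> omega
    have hB := alt_fold_char n (r :: rs) (List.replicate n (0 : Int)) (by simp) hbound
    rw [hA, hB]
    apply List.map_congr_left
    intro j hj
    have hjn : j < n := List.mem_range.mp hj
    have : (List.replicate n (0 : Int)).getD j 0 = 0 := by
      simp [List.getD, List.getElem?_eq_getElem, hjn]
    rw [this, zero_add]
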